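-- pv_equiv track=rewrite | github.com/coolbluealan/dotfiles | py-scripts/ysa.py | parse_subexp
-- ===== SOURCE A (Python) =====
-- def parse_subexp(tokens: list[str], idx: int) -> tuple[str, int]:
--     token = tokens[idx]
--     idx += 1
--     if token[-1] == "(":
--         args = []
--         while tokens[idx] != ")":
--             exp, idx = parse_subexp(tokens, idx)
--             args.append(exp)
--
--         if len(token) > 1 and token[-2].isalpha():
--             res = ",".join(args)
--             for op in ["+", "-", "*", "/"]:
--                 res = res.replace("," + op, op)
--         else:
--             res = "".join(args)
--
--         return token + res + ")", idx + 1
--     return token, idx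
-- ===== SOURCE B (Python) =====
-- def parse_subexp(tokens: list[str], idx: int) -> tuple[str, int]:
--     token = tokens[idx]
--     idx += 1
--     if token[-1] != "(":
--         return token, idx
--     stack = [(token, [])]
--     while True:
--         t = tokens[idx]
--         idx += 1
--         if t == ")":
--             tok, args = stack.pop()
--             if len(tok) > 1 and tok[-2].isalpha():
--                 res = ",".join(args)
--                 for op in ["+", "-", "*", "/"]:
--                     res = res.replace("," + op, op)
--             else:
--                 res = "".join(args)
--             exp = tok + res + ")"
--             if not stack:
--                 return exp, idx
--             stack[-1][1].append(exp)
--         elif t[-1] == "(":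
--             stack.append((t, []))
--         else:
--             stack[-1][1].append(t)
-- ===== Notes on version B (the rewrite author's own statement) =====
-- stated objective: alternative
-- what changed: A's recursive-descent parser (a recursive function with an inner while loop per open token) is replaced by a single-loop explicit stack machine that keeps a stack of (open token, collected args) frames and never recurses.
import Mathlib
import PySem

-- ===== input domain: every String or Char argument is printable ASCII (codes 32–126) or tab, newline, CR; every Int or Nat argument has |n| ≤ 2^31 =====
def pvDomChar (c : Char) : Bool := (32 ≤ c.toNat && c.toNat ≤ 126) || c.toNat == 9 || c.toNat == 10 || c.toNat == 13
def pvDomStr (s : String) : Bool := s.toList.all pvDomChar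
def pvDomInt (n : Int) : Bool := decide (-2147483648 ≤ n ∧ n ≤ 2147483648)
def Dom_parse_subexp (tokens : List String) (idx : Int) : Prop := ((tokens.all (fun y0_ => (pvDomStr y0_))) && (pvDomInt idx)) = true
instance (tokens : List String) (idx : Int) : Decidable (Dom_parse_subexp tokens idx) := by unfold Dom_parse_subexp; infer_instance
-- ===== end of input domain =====

set_option maxRecDepth 8192


-- B replaces A's recursive-descent parser by an explicit stack machine (one loop, a stack of
-- open frames) — objective: alternative decomposition, same cost; return values proven equal on Pre_.

-- Both Pythons contain the identical argument-finishing code (join + comma-stripping); shared helper.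
def pvFinish (tok : String) (args : List String) : String :=
  if (decide (1 < PySem.Str.len tok) && ((PySem.Str.pyGet? tok (-2)).elim false PySem.Chars.isalpha)) = true then
    let res := PySem.Str.join "," args
    ["+", "-", "*", "/"].foldl (fun r op => PySem.Str.replace r ("," ++ op) op) res
  else
    PySem.Str.join "" args

-- cited by the ports' decreasing_by: a successful xs[i] means i < len(xs)
theorem pvGet_lt {α : Type} {xs : List α} {i : Int} {a : α} (h : PySem.List.pyGet? xs i = some a) : i < (xs.length : Int) := by
  by_contra hc
  have h1 := (PySem.List.pyGet?_eq_none_iff (xs := xs) (i := i)).2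
  simp [PySem.Raise.InRange] at h1
  rw [h1 (by omega)] at h
  cases h

-- ===== PORT A =====
-- Literal port of A's recursive descent; exceptions (IndexError on tokens[idx] / token[-1]) are
-- none; the subtype proof idx < result.2 is termination bookkeeping only.
mutual
def parseAux (tokens : List String) (idx : Int) : Option {r : String × Int // idx < r.2} :=
  match h : PySem.List.pyGet? tokens idx with
  | none => none
  | some token =>
    match PySem.Str.pyGet? token (-1) with
    | none => none
    | some c =>
      if c = '(' then
        match loopAux tokens (idx + 1) [] with
        | none => none
        | some ⟨(args, i2), h2⟩ =>
          some ⟨(token ++ pvFinish token args ++ ")", i2), by omega⟩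
      else
        some ⟨(token, idx + 1), by omega⟩
  termination_by ((2 * ((tokens.length : Int) - idx)).toNat, 0)
  decreasing_by
    have := pvGet_lt h
    apply Prod.Lex.left
    omega

def loopAux (tokens : List String) (idx : Int) (args : List String) : Option {r : List String × Int // idx < r.2} :=
  match h : PySem.List.pyGet? tokens idx with
  | none => none
  | some t =>
    if t = ")" then some ⟨(args, idx + 1), by omega⟩
    else
      match parseAux tokens idx with
      | none => none
      | some ⟨(e, i1), h1⟩ =>
        match loopAux tokens i1 (args ++ [e]) with
        | none => none
        | some ⟨(as, i2), h2⟩ => some ⟨(as, i2), by omega⟩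
  termination_by ((2 * ((tokens.length : Int) - idx)).toNat, 1)
  decreasing_by
    · have := pvGet_lt h
      apply Prod.Lex.right'
      · omega
      · omega
    · have := pvGet_lt h
      apply Prod.Lex.left
      omega
end

def parse_subexp (tokens : List String) (idx : Int) : String × Int :=
  match parseAux tokens idx with
  | none => ("", 0)        -- A raises here; value never claimed (outside Pre_)
  | some ⟨r, _⟩ => r

-- ===== PORT B =====
-- Literal port of B's stack machine: one loop, stack of (open token, collected args) frames.
def bLoop (tokens : List String) (idx : Int) (stack : List (String × List String)) : Option (String × Int) :=
  match h : PySem.List.pyGet? tokens idx with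
  | none => none
  | some t =>
    if t = ")" then
      match stack with
      | [] => none         -- unreachable: the loop starts with one frame and returns on the last pop
      | (tok, args) :: rest =>
        let exp := tok ++ pvFinish tok args ++ ")"
        match rest with
        | [] => some (exp, idx + 1)
        | (t2, a2) :: r => bLoop tokens (idx + 1) ((t2, a2 ++ [exp]) :: r)
    else
      match PySem.Str.pyGet? t (-1) with
      | none => none
      | some c =>
        if c = '(' then bLoop tokens (idx + 1) ((t, []) :: stack)
        else
          match stack with
          | [] => none     -- unreachable, as above
          | (tok, args) :: rest => bLoop tokens (idx + 1) ((tok, args ++ [t]) :: rest)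
termination_by (((tokens.length : Int) - idx)).toNat
decreasing_by
  all_goals (have := pvGet_lt h; omega)

def parse_subexp_alt (tokens : List String) (idx : Int) : String × Int :=
  match PySem.List.pyGet? tokens idx with
  | none => ("", 0)
  | some token =>
    match PySem.Str.pyGet? token (-1) with
    | none => ("", 0)
    | some c =>
      if c = '(' then (bLoop tokens (idx + 1) [(token, [])]).getD ("", 0)
      else (token, idx + 1)

-- ===== PRECONDITION & SPEC =====
-- Pre_ = exactly the inputs where Python's parse_subexp returns (no IndexError): the start token
-- exists and is nonempty; if it opens a group, some contiguous stretch of existing nonempty tokens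
-- brings the paren balance (opener +1, ")" -1, leaf 0) back to zero.
def pvTokW (tokens : List String) (k : Int) : Int :=
  match PySem.List.pyGet? tokens k with
  | none => 0
  | some s => if s = ")" then -1 else if PySem.Str.pyGet? s (-1) = some '(' then 1 else 0

def pvTokOk (tokens : List String) (k : Int) : Bool :=
  match PySem.List.pyGet? tokens k with
  | none => false
  | some s => s ≠ ""

def pvPreB (tokens : List String) (idx : Int) : Bool :=
  match PySem.List.pyGet? tokens idx with
  | none => false
  | some t =>
    if t = "" then false
    else if PySem.Str.pyGet? t (-1) = some '(' then
      (List.range (2 * tokens.length + 1)).any (fun m =>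
        ((List.range (m + 1)).all (fun k => pvTokOk tokens (idx + k))) &&
        (((List.range (m + 1)).map (fun k => pvTokW tokens (idx + k))).sum == 0))
    else true

def Pre_parse_subexp (tokens : List String) (idx : Int) : Prop := pvPreB tokens idx = true
instance (tokens : List String) (idx : Int) : Decidable (Pre_parse_subexp tokens idx) := by unfold Pre_parse_subexp; infer_instance

def pvWitness_parse_subexp : List String × Int := (["sum(", "a", "+", ")", ")"], 0)

def Spec_parse_subexp (tokens : List String) (idx : Int) (out : String × Int) : Prop := out = parse_subexp_alt tokens idx
instance (tokens : List String) (idx : Int) (out : String × Int) : Decidable (Spec_parse_subexp tokens idx out) := by unfold Spec_parse_subexp; infer_instance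

-- ===== CLAIM (what is proved, stated in full; the proofs are below) =====
def Claim_equal_parse_subexp : Prop := ∀ (tokens : List String) (idx : Int), Dom_parse_subexp tokens idx → Pre_parse_subexp tokens idx → Spec_parse_subexp tokens idx (parse_subexp tokens idx)

-- ===== LEMMAS AND PROOFS =====

-- continuation of B's loop after the top frame was finished into exp at position i
def bResume (tokens : List String) (rest : List (String × List String)) (e : String) (i : Int) : Option (String × Int) :=
  match rest with
  | [] => some (e, i)
  | (t2, a2) :: r => bLoop tokens i ((t2, a2 ++ [e]) :: r)

-- simulation: B's stack loop on a frame (tok, acc) computes exactly what A's argument loop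
-- (started with accumulator acc) produces, then resumes the pending frames; failures coincide.
theorem pv_loop_sim (tokens : List String) : ∀ (n : ℕ) (idx : Int) (acc : List String) (tok : String) (rest : List (String × List String)),
    (2 * ((tokens.length : Int) - idx)).toNat < n →
    bLoop tokens idx ((tok, acc) :: rest) =
      (match loopAux tokens idx acc with
       | none => none
       | some ⟨(as, i2), _⟩ => bResume tokens rest (tok ++ pvFinish tok as ++ ")") i2) := by
  intro n
  induction n with
  | zero => intro idx acc tok rest h; omega
  | succ n ih =>
    intro idx acc tok rest hlt
    rw [bLoop.eq_def, loopAux.eq_def]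
    cases hget : PySem.List.pyGet? tokens idx with
    | none => simp
    | some t =>
      have hidx : idx < (tokens.length : Int) := pvGet_lt hget
      simp only
      by_cases hcl : t = ")"
      · subst hcl
        simp [bResume]
      · rw [if_neg hcl, if_neg hcl]
        rw [parseAux.eq_def]
        rw [hget]
        simp only
        cases hlast : PySem.Str.pyGet? t (-1) with
        | none => simp
        | some c =>
          simp only
          by_cases hop : c = '('
          · subst hop
            rw [if_pos rfl, if_pos rfl]
            rw [ih (idx + 1) [] t ((tok, acc) :: rest) (by omega)]
            rcases hinner : loopAux tokens (idx + 1) [] with _ | ⟨⟨ias, i1⟩, hi1⟩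
            · simp
            · simp only [bResume]
              rw [ih i1 (acc ++ [t ++ pvFinish t ias ++ ")"]) tok rest (by omega)]
              rcases houter : loopAux tokens i1 (acc ++ [t ++ pvFinish t ias ++ ")"]) with _ | ⟨⟨as2, i2⟩, hi2⟩
              · simp
              · cases rest <;> simp [bResume]
          · rw [if_neg hop, if_neg hop]
            rw [ih (idx + 1) (acc ++ [t]) tok rest (by omega)]
            rcases hnext : loopAux tokens (idx + 1) (acc ++ [t]) with _ | ⟨⟨as2, i2⟩, hi2⟩
            · simp [hnext]
            · cases rest <;> simp [hnext, bResume]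

-- ===== VERDICT (by name: the statement is the Claim_ definition above) =====
theorem parse_subexp_spec : Claim_equal_parse_subexp := by
  intro tokens idx _hdom _hpre
  unfold Spec_parse_subexp parse_subexp parse_subexp_alt
  rw [parseAux.eq_def]
  cases hget : PySem.List.pyGet? tokens idx with
  | none => simp
  | some token =>
    simp only
    cases hlast : PySem.Str.pyGet? token (-1) with
    | none => simp
    | some c =>
      simp only
      by_cases hop : c = '('
      · subst hop
        rw [if_pos rfl, if_pos rfl]
        rw [pv_loop_sim tokens ((2 * ((tokens.length : Int) - (idx + 1))).toNat + 1) (idx + 1) [] token [] (by omega)]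
        rcases hinner : loopAux tokens (idx + 1) [] with _ | ⟨⟨ias, i1⟩, hi1⟩
        · simp
        · simp [bResume]
      · rw [if_neg hop, if_neg hop]
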